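-- pv_equiv track=rewrite | github.com/Hei-Lima/gen-o | examples/examples.py | triple_nested_sum
-- ===== SOURCE A (Python) =====
-- from typing import List, Optional, Tuple
--
-- def triple_nested_sum(arr: List[int]) -> int:
--     total = 0
--     n = len(arr)
--     for i in range(n):
--         for j in range(n):
--             for k in range(n):
--                 total += arr[i] + arr[j] + arr[k]
--     return total
-- ===== SOURCE B (Python) =====
-- def triple_nested_sum(arr):
--     n = len(arr)
--     return 3 * n * n * sum(arr)
-- ===== Notes on version B (the rewrite author's own statement) =====
-- stated objective: faster
-- what changed: Replaced the triple nested loop with the closed form 3*n^2*sum(arr), since each element appears in exactly 3*n^2 addend positions.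
import Mathlib
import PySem

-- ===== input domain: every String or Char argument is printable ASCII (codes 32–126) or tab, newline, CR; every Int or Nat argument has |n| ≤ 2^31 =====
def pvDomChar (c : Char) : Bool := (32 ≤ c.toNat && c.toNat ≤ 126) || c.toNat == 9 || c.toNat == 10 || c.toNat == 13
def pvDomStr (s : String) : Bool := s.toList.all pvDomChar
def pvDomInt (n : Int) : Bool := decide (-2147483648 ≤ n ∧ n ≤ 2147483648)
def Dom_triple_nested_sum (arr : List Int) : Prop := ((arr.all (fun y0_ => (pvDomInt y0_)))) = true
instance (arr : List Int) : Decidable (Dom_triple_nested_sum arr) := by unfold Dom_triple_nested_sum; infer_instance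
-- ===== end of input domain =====

-- B replaces A's O(n^3) triple loop by the closed form 3*n^2*sum(arr) (objective: faster).

-- ===== PORT A =====
def triple_nested_sum (arr : List Int) : Int :=
  let total : Int := 0
  let n : Int := (arr.length : Int)
  (PySem.List.pyRange 0 n 1).foldl (fun total i =>
    (PySem.List.pyRange 0 n 1).foldl (fun total j =>
      (PySem.List.pyRange 0 n 1).foldl (fun total k =>
        total + (PySem.List.pyGetD arr i 0 + PySem.List.pyGetD arr j 0 + PySem.List.pyGetD arr k 0))
        total)
      total)
    total

-- ===== PORT B =====
def triple_nested_sum_alt (arr : List Int) : Int :=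
  let n : Int := (arr.length : Int)
  3 * n * n * arr.sum

-- ===== PRECONDITION & SPEC =====
def Spec_triple_nested_sum (arr : List Int) (out : Int) : Prop := out = triple_nested_sum_alt arr
instance (arr : List Int) (out : Int) : Decidable (Spec_triple_nested_sum arr out) := by unfold Spec_triple_nested_sum; infer_instance

-- ===== CLAIM (what is proved, stated in full; the proofs are below) =====
def Claim_equal_triple_nested_sum : Prop := ∀ (arr : List Int), Dom_triple_nested_sum arr → Spec_triple_nested_sum arr (triple_nested_sum arr)



-- ===== LEMMAS AND PROOFS =====

-- a fold adding an affine function of each element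
theorem pv_foldl_lin (xs : List Int) (p q t : Int) :
    xs.foldl (fun acc x => acc + (p * x + q)) t = t + p * xs.sum + (xs.length : Int) * q := by
  induction xs generalizing t with
  | nil => simp
  | cons h tl ih => simp [List.foldl_cons, ih]; ring

-- innermost loop: for k in range(n): total += (c + arr[k])
theorem pv_inner (arr : List Int) (c t : Int) :
    (PySem.List.pyRange 0 (arr.length : Int) 1).foldl
      (fun acc k => acc + (c + PySem.List.pyGetD arr k 0)) t
    = t + (arr.length : Int) * c + arr.sum := by
  rw [PySem.List.foldl_pyRange_zero_pyGetD' arr 0 (fun acc x => acc + (c + x)) t]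
  have h : (fun (acc x : Int) => acc + (c + x)) = fun acc x => acc + (1 * x + c) := by
    funext acc x; ring
  rw [h, pv_foldl_lin]; ring

-- middle loop after the inner loop is summed out
theorem pv_mid (arr : List Int) (c t : Int) :
    (PySem.List.pyRange 0 (arr.length : Int) 1).foldl
      (fun acc j => acc + (arr.length : Int) * (c + PySem.List.pyGetD arr j 0) + arr.sum) t
    = t + (arr.length : Int) * (arr.length : Int) * c + 2 * (arr.length : Int) * arr.sum := by
  rw [PySem.List.foldl_pyRange_zero_pyGetD' arr 0
      (fun acc x => acc + (arr.length : Int) * (c + x) + arr.sum) t]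
  have h : (fun (acc x : Int) => acc + (arr.length : Int) * (c + x) + arr.sum)
      = fun acc x => acc + ((arr.length : Int) * x + ((arr.length : Int) * c + arr.sum)) := by
    funext acc x; ring
  rw [h, pv_foldl_lin]; ring

-- outer loop after the two inner loops are summed out
theorem pv_outer (arr : List Int) (t : Int) :
    (PySem.List.pyRange 0 (arr.length : Int) 1).foldl
      (fun acc i => acc + (arr.length : Int) * (arr.length : Int) * PySem.List.pyGetD arr i 0
        + 2 * (arr.length : Int) * arr.sum) t
    = t + 3 * (arr.length : Int) * (arr.length : Int) * arr.sum := by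
  rw [PySem.List.foldl_pyRange_zero_pyGetD' arr 0
      (fun acc x => acc + (arr.length : Int) * (arr.length : Int) * x + 2 * (arr.length : Int) * arr.sum) t]
  have h : (fun (acc x : Int) => acc + (arr.length : Int) * (arr.length : Int) * x + 2 * (arr.length : Int) * arr.sum)
      = fun acc x => acc + ((arr.length : Int) * (arr.length : Int) * x + 2 * (arr.length : Int) * arr.sum) := by
    funext acc x; ring
  rw [h, pv_foldl_lin]; ring

-- ===== VERDICT (by name: the statement is the Claim_ definition above) =====
theorem triple_nested_sum_spec : Claim_equal_triple_nested_sum := by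
  intro arr _
  unfold Spec_triple_nested_sum triple_nested_sum triple_nested_sum_alt
  simp only [pv_inner, pv_mid, pv_outer]
  ring
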